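-- pv_equiv track=rewrite | github.com/bifidotich/alkash_party_2_0 | aikash/tree_model.py | compare_strings_by_fragments
-- ===== SOURCE A (Python) =====
-- def compare_strings_by_fragments(str1, str2):
--     fragment_length = range(3, 10)
--     common_fragments = set()
--
--     for length in fragment_length:
--         for i in range(len(str1) - length + 1):
--             fragment = str1[i:i + length]
--             if fragment in str2:
--                 common_fragments.add(fragment)
--
--     return len(common_fragments)
-- ===== SOURCE B (Python) =====
-- def compare_strings_by_fragments(str1, str2):
--     s2 = {str2[i:i + length] for length in range(3, 10)
--           for i in range(len(str2) - length + 1)}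
--     s1 = {str1[i:i + length] for length in range(3, 10)
--           for i in range(len(str1) - length + 1)}
--     return len(s1 & s2)
-- ===== Notes on version B (the rewrite author's own statement) =====
-- stated objective: faster
-- what changed: Instead of scanning str2 with `fragment in str2` for every fragment of str1 and conditionally accumulating a set, B pre-builds the sets of all length-3..9 substrings of str2 and of str1 and returns the size of their intersection.
import Mathlib
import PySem

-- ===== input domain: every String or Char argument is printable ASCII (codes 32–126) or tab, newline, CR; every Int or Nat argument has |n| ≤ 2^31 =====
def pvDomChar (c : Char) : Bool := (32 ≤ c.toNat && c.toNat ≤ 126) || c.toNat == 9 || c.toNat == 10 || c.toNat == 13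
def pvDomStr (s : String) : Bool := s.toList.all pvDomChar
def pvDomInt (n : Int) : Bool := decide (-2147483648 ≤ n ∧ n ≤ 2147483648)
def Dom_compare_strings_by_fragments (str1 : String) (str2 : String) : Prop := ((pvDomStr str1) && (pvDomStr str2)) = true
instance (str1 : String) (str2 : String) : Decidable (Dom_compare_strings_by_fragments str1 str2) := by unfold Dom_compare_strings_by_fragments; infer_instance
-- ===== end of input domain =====

-- B replaces A's per-fragment `in str2` scans with two pre-built substring sets and one
-- intersection (objective: faster).

-- ===== PORT A =====
def compare_strings_by_fragments (str1 : String) (str2 : String) : Int :=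
  let fragment_length := PySem.List.pyRange 3 10 1
  let common_fragments : PySem.Set String :=
    fragment_length.foldl (fun cf length =>
      (PySem.List.pyRange 0 (PySem.Str.len str1 - length + 1) 1).foldl (fun cf i =>
        let fragment := PySem.Str.slice str1 (some i) (some (i + length))
        if PySem.Str.isIn fragment str2 then PySem.Set.add cf fragment else cf) cf)
      PySem.Set.empty
  PySem.Set.len common_fragments

-- ===== PORT B =====
-- the set comprehension {s[i:i+length] for length in range(3,10) for i in range(len(s)-length+1)}
def pvFrags (s : String) : List String :=
  (PySem.List.pyRange 3 10 1).flatMap (fun length =>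
    (PySem.List.pyRange 0 (PySem.Str.len s - length + 1) 1).map (fun i =>
      PySem.Str.slice s (some i) (some (i + length))))

def compare_strings_by_fragments_alt (str1 : String) (str2 : String) : Int :=
  let s2 : PySem.Set String := PySem.Set.ofList (pvFrags str2)
  let s1 : PySem.Set String := PySem.Set.ofList (pvFrags str1)
  PySem.Set.len (PySem.Set.inter s1 s2)

-- ===== PRECONDITION & SPEC =====
def Spec_compare_strings_by_fragments (str1 : String) (str2 : String) (out : Int) : Prop := out = compare_strings_by_fragments_alt str1 str2
instance (str1 : String) (str2 : String) (out : Int) : Decidable (Spec_compare_strings_by_fragments str1 str2 out) := by unfold Spec_compare_strings_by_fragments; infer_instance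

-- ===== CLAIM (what is proved, stated in full; the proofs are below) =====
def Claim_equal_compare_strings_by_fragments : Prop := ∀ (str1 : String) (str2 : String), Dom_compare_strings_by_fragments str1 str2 → Spec_compare_strings_by_fragments str1 str2 (compare_strings_by_fragments str1 str2)

-- ===== LEMMAS AND PROOFS =====

-- filtering commutes with Python-set construction by repeated `add` (first-occurrence dedup)
theorem foldl_add_filter {α : Type} [BEq α] [LawfulBEq α] (p : α → Bool) (xs : List α)
    (s : PySem.Set α) :
    (xs.filter p).foldl PySem.Set.add (s.filter p) = (xs.foldl PySem.Set.add s).filter p := by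
  induction xs generalizing s with
  | nil => rfl
  | cons x xs ih =>
    by_cases hp : p x <;> by_cases hm : x ∈ s <;>
      simp only [List.filter_cons, hp, if_pos, if_neg, Bool.false_eq_true,
        not_false_eq_true, List.foldl_cons, PySem.Set.add,
        PySem.Set.contains_eq_listContains, List.contains_eq_mem, hm, decide_true,
        decide_false, List.mem_filter, and_true]
    · exact ih s
    · have h1 : s.filter p ++ [x] = (s ++ [x]).filter p := by
        simp [List.filter_append, hp]
      rw [h1]; exact ih (s ++ [x])
    · exact ih s
    · have h1 : s.filter p = (s ++ [x]).filter p := by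
        simp [List.filter_append, hp]
      rw [h1]; exact ih (s ++ [x])

theorem ofList_filter {α : Type} [BEq α] [LawfulBEq α] (p : α → Bool) (xs : List α) :
    PySem.Set.ofList (xs.filter p) = (PySem.Set.ofList xs).filter p := by
  simpa [PySem.Set.ofList, PySem.Set.empty] using foldl_add_filter p xs PySem.Set.empty

-- membership characterisation of the fragment list
theorem mem_pvFrags (s : String) (f : String) :
    f ∈ pvFrags s ↔ ∃ j L : ℕ, 3 ≤ L ∧ L ≤ 9 ∧ j + L ≤ s.toList.length ∧
      f.toList = (s.toList.drop j).take L := by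
  unfold pvFrags
  simp only [List.mem_flatMap, List.mem_map, PySem.List.mem_pyRange_one, PySem.Str.len_eq]
  constructor
  · rintro ⟨L, ⟨hL3, hL10⟩, i, ⟨hi0, hilt⟩, rfl⟩
    refine ⟨i.toNat, L.toNat, by omega, by omega, by omega, ?_⟩
    rw [PySem.Str.toList_slice]
    have hi : (i.toNat : Int) = i := Int.toNat_of_nonneg hi0
    have hL : (L.toNat : Int) = L := Int.toNat_of_nonneg (by omega)
    rw [PySem.Chars.slice, ← hi, ← hL, PySem.List.slice_natCast_add]
    congr 2 <;> omega
  · rintro ⟨j, L, hL3, hL9, hle, hf⟩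
    refine ⟨(L : Int), ⟨by omega, by omega⟩, (j : Int), ⟨by omega, by omega⟩, ?_⟩
    apply String.toList_inj.mp
    rw [PySem.Str.toList_slice, PySem.Chars.slice, PySem.List.slice_natCast_add, hf]

-- the substring test of A is membership in the fragment set of str2 that B builds
theorem isIn_eq_contains (str1 str2 f : String) (h : f ∈ pvFrags str1) :
    PySem.Str.isIn f str2 = (PySem.Set.ofList (pvFrags str2)).contains f := by
  obtain ⟨j1, L, hL3, hL9, hle1, hf1⟩ := (mem_pvFrags str1 f).mp h
  have e1 : str1.toList.length = str1.length := String.length_toList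
  have hlen : f.toList.length = L := by
    rw [hf1]; simp [List.length_take, List.length_drop]; omega
  by_cases hin : PySem.Str.isIn f str2
  · rw [hin]; symm
    obtain ⟨pre, suf, hps⟩ := (PySem.Str.isIn_iff_infix f str2).mp hin
    rw [PySem.Set.contains_eq_listContains, List.contains_eq_mem, decide_eq_true_iff,
      PySem.Set.mem_ofList, mem_pvFrags]
    refine ⟨pre.length, L, hL3, hL9, ?_, ?_⟩
    · have e2 : str2.toList.length = str2.length := String.length_toList
      have ef : f.toList.length = f.length := String.length_toList
      have := congrArg List.length hps; simp at this; omega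
    · rw [← hps, List.append_assoc, List.drop_left, List.take_left' hlen]
  · simp only [Bool.not_eq_true] at hin
    rw [hin]; symm
    rw [PySem.Set.contains_eq_listContains, List.contains_eq_mem, decide_eq_false_iff_not,
      PySem.Set.mem_ofList, mem_pvFrags]
    rintro ⟨j2, L2, _, _, hle2, hf2⟩
    have : PySem.Str.isIn f str2 = true := by
      rw [PySem.Str.isIn_iff_infix, hf2]
      exact (List.take_prefix _ _).isInfix.trans (List.drop_suffix _ _).isInfix
    rw [this] at hin; simp at hin

-- A's conditional accumulation is `ofList` of the filtered fragment list
theorem portA_eq (str1 str2 : String) :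
    compare_strings_by_fragments str1 str2 =
      PySem.Set.len (PySem.Set.ofList
        ((pvFrags str1).filter (fun f => PySem.Str.isIn f str2))) := by
  simp only [compare_strings_by_fragments, pvFrags, PySem.Set.ofList,
    List.foldl_filter, List.foldl_flatMap, List.foldl_map]

-- ===== VERDICT (by name: the statement is the Claim_ definition above) =====
theorem compare_strings_by_fragments_spec : Claim_equal_compare_strings_by_fragments := by
  intro str1 str2 _
  unfold Spec_compare_strings_by_fragments
  rw [portA_eq]
  unfold compare_strings_by_fragments_alt
  rw [List.filter_congr (fun f hf => isIn_eq_contains str1 str2 f hf), ofList_filter]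
  rfl
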